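-- pv_equiv track=rewrite | github.com/yuramayer/python-tasks | 11/temp.py | check_tasks
-- ===== SOURCE A (Python) =====
-- def check_tasks(tasks, N):
--
--     tasks = sorted(tasks, key=lambda x: x[2])
--
--     # создаём мапу вида
--     # воркер - его время освобождения
--     workers = {i: 0 for i in range(N)}
--
--     # мы проверяем, если каждый раз
--     # будем отправлять самого раннего воркера,
--     # сработает ли схема?
--     # если поймаем ошибку,
--     # значит невозможно
--     for task_name, dur, delay_max in tasks:
--
--         # создадим переменные под поиск
--         # самого свободного воркера
--         min_value = float('inf')
--         min_worker_ix = N+1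
--
--         for worker_ix, worker_time in workers.items():
--             if worker_time < min_value:
--                 min_value = worker_time
--                 min_worker_ix = worker_ix
--
--         # по итогу стартуем на раннем воркере
--         worker_start_time = workers[min_worker_ix]
--
--         # упс - самый ранний воркер не успел
--         if worker_start_time > delay_max:
--             return False
--
--         # воркер теперь будет загружен
--         workers[min_worker_ix] = worker_start_time + dur
--
--     return True
-- ===== SOURCE B (Python) =====
-- def check_tasks(tasks, N):
--     # Ascending list of worker free-times; pop the earliest, re-insert
--     # at the position found by a binary search.
--     free = [0] * N
--     for _task_name, dur, delay_max in sorted(tasks, key=lambda x: x[2]):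
--         t = free.pop(0)
--         if t > delay_max:
--             return False
--         nt = t + dur
--         lo, hi = 0, len(free)
--         while lo < hi:
--             mid = (lo + hi) // 2
--             if free[mid] <= nt:
--                 lo = mid + 1
--             else:
--                 hi = mid
--         free.insert(lo, nt)
--     return True
-- ===== Notes on version B (the rewrite author's own statement) =====
-- stated objective: faster
-- what changed: B replaces A's dict of N workers with a full Python-level min-scan per task by an ascending list of free times: pop the front (the minimum) and re-insert the updated time at a position found by binary search.
import Mathlib
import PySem

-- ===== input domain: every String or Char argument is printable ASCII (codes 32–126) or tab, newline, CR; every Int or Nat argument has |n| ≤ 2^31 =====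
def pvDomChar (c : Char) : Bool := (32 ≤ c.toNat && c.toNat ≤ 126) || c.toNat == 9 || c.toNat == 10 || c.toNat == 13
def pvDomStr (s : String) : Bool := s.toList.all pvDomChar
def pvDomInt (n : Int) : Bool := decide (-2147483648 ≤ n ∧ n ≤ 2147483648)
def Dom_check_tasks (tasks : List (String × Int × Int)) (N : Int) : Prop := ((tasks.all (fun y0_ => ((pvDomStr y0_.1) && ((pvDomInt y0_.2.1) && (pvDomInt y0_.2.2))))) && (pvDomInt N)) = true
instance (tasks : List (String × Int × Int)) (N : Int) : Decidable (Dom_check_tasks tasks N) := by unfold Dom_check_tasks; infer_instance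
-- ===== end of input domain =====

-- B replaces A's per-task min-scan over a worker dict by an ascending list of free times
-- (pop the front, re-insert in order); equal return value on all inputs where A does not raise.

-- ===== PORT A =====
-- inner 'for worker_ix, worker_time in workers.items()' min-search;
-- acc.1 = min_value (none plays float('inf')), acc.2 = min_worker_ix
def pvAStep (acc : Option Int × Int) (p : Int × Int) : Option Int × Int :=
  if (match acc.1 with | none => true | some m => p.2 < m) then (some p.2, p.1) else acc

def pvALoop (N : Int) (workers : PySem.Dict Int Int) : List (String × Int × Int) → Bool
  | [] => true
  | (_, dur, delay_max) :: rest =>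
    let mv := workers.items.foldl pvAStep (none, N + 1)
    -- workers[min_worker_ix]: Python raises KeyError when absent — excluded by Pre_
    let worker_start_time := workers.getD mv.2 0
    if worker_start_time > delay_max then false
    else pvALoop N (workers.insert mv.2 (worker_start_time + dur)) rest

def check_tasks (tasks : List (String × Int × Int)) (N : Int) : Bool :=
  pvALoop N
    ((PySem.List.pyRange 0 N 1).foldl (fun d i => d.insert i (0 : Int)) PySem.Dict.empty)
    (PySem.List.sorted tasks (fun x => x.2.2) false)

-- ===== PORT B =====
-- the 'while lo < hi' binary search for the insertion point (Python's 'mid' is inlined)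
def pvBisect (free : List Int) (nt : Int) (lo hi : Int) : Int :=
  if lo < hi then
    if PySem.List.pyGetD free (PySem.Int.floordiv (lo + hi) 2) 0 ≤ nt then
      pvBisect free nt (PySem.Int.floordiv (lo + hi) 2 + 1) hi
    else pvBisect free nt lo (PySem.Int.floordiv (lo + hi) 2)
  else lo
termination_by (hi - lo).toNat
decreasing_by
  · have := PySem.Int.floordiv_two_mid_bounds (lo := lo) (hi := hi) (by omega)
    omega
  · have := PySem.Int.floordiv_two_mid_bounds (lo := lo) (hi := hi) (by omega)
    have hlt : PySem.Int.floordiv (lo + hi) 2 < hi :=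
      (PySem.Int.floordiv_lt_iff_lt_mul (by omega)).mpr (by omega)
    omega

def pvBLoop (free : List Int) : List (String × Int × Int) → Bool
  | [] => true
  | (_, dur, delay_max) :: rest =>
    -- free.pop(0): Python raises IndexError on an empty list — excluded by Pre_
    match free with
    | [] => false
    | t :: free' =>
      if t > delay_max then false
      else pvBLoop (PySem.List.insert free' (pvBisect free' (t + dur) 0 (PySem.List.len free')) (t + dur)) rest

def check_tasks_alt (tasks : List (String × Int × Int)) (N : Int) : Bool :=
  pvBLoop (List.replicate N.toNat 0) (PySem.List.sorted tasks (fun x => x.2.2) false)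

-- ===== PRECONDITION & SPEC =====
-- With a nonempty task list and N ≤ 0 there is no worker: A raises KeyError (B raises IndexError); excluded.
def Pre_check_tasks (tasks : List (String × Int × Int)) (N : Int) : Prop := tasks = [] ∨ 1 ≤ N
instance (tasks : List (String × Int × Int)) (N : Int) : Decidable (Pre_check_tasks tasks N) := by unfold Pre_check_tasks; infer_instance
def pvWitness_check_tasks : (List (String × Int × Int)) × Int := ([("a", 2, 3), ("b", 1, 1)], 1)

def Spec_check_tasks (tasks : List (String × Int × Int)) (N : Int) (out : Bool) : Prop := out = check_tasks_alt tasks N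
instance (tasks : List (String × Int × Int)) (N : Int) (out : Bool) : Decidable (Spec_check_tasks tasks N out) := by unfold Spec_check_tasks; infer_instance

-- ===== CLAIM (what is proved, stated in full; the proofs are below) =====
def Claim_equal_check_tasks : Prop := ∀ (tasks : List (String × Int × Int)) (N : Int), Dom_check_tasks tasks N → Pre_check_tasks tasks N → Spec_check_tasks tasks N (check_tasks tasks N)

-- ===== LEMMAS AND PROOFS =====

-- the min-scan fold, from an already-some accumulator
theorem pvAStep_foldl_some (l : List (Int × Int)) (m0 : Int) (k0 : Int) :
    ∃ m k, l.foldl pvAStep (some m0, k0) = (some m, k) ∧ m ≤ m0 ∧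
      ((m = m0 ∧ k = k0) ∨ (k, m) ∈ l) ∧ ∀ p ∈ l, m ≤ p.2 := by
  induction l generalizing m0 k0 with
  | nil => exact ⟨m0, k0, rfl, le_refl _, Or.inl ⟨rfl, rfl⟩, by simp⟩
  | cons p l ih =>
    simp only [List.foldl_cons, pvAStep]
    by_cases h : p.2 < m0
    · simp only [h, if_pos]
      obtain ⟨m, k, heq, hle, hmem, hall⟩ := ih p.2 p.1
      refine ⟨m, k, heq, by omega, ?_, ?_⟩
      · rcases hmem with ⟨h1, h2⟩ | h1
        · exact Or.inr (by simp [h1, h2])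
        · exact Or.inr (List.mem_cons_of_mem _ h1)
      · intro q hq
        rcases List.mem_cons.mp hq with h1 | h1
        · subst h1; omega
        · exact hall q h1
    · simp only [h, if_neg, if_false, ite_false]
      obtain ⟨m, k, heq, hle, hmem, hall⟩ := ih m0 k0
      refine ⟨m, k, heq, hle, ?_, ?_⟩
      · rcases hmem with ⟨h1, h2⟩ | h1
        · exact Or.inl ⟨h1, h2⟩
        · exact Or.inr (List.mem_cons_of_mem _ h1)
      · intro q hq
        rcases List.mem_cons.mp hq with h1 | h1
        · subst h1; omega
        · exact hall q h1

-- the min-scan fold on a nonempty items list finds a key/value pair that is minimal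
theorem pvAStep_foldl_min (l : List (Int × Int)) (hne : l ≠ []) (N : Int) :
    ∃ m k, l.foldl pvAStep (none, N + 1) = (some m, k) ∧ (k, m) ∈ l ∧ ∀ p ∈ l, m ≤ p.2 := by
  cases l with
  | nil => exact absurd rfl hne
  | cons p l =>
    simp only [List.foldl_cons, pvAStep]
    obtain ⟨m, k, heq, hle, hmem, hall⟩ := pvAStep_foldl_some l p.2 p.1
    refine ⟨m, k, heq, ?_, ?_⟩
    · rcases hmem with ⟨h1, h2⟩ | h1
      · exact List.mem_cons.mpr (Or.inl (by simp [h1, h2]))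
      · exact List.mem_cons_of_mem _ h1
    · intro q hq
      rcases List.mem_cons.mp hq with h1 | h1
      · subst h1; omega
      · exact hall q h1

-- replacing the (unique) entry at key k by value v replaces its value in the value list
theorem pvValues_replace (l : List (Int × Int)) (k m v : Int)
    (hnd : (l.map (·.1)).Nodup) (hmem : (k, m) ∈ l) :
    ((l.map (fun p => if p.1 == k then (k, v) else p)).map (·.2)).Perm
      (v :: (l.map (·.2)).erase m) := by
  induction l with
  | nil => simp at hmem
  | cons q l ih =>
    simp only [List.map_cons, List.nodup_cons] at hnd
    rcases List.mem_cons.mp hmem with h1 | h1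
    · subst h1
      simp only [List.map_cons, beq_self_eq_true, if_pos, List.erase_cons_head]
      refine List.Perm.cons v ?_
      have hno : ∀ p ∈ l, p.1 ≠ k := by
        intro p hp hpk
        exact hnd.1 (by simpa [hpk] using List.mem_map_of_mem (f := (·.1)) hp)
      have hmap : l.map (fun p => if p.1 == k then (k, v) else p) = l := by
        conv_rhs => rw [← List.map_id l]
        apply List.map_congr_left
        intro p hp
        simp [hno p hp]
      rw [hmap]
    · have hqk : q.1 ≠ k := by
        intro hqk
        exact hnd.1 (by simpa [hqk] using List.mem_map_of_mem (f := (·.1)) h1)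
      have hih := ih hnd.2 h1
      simp only [beq_iff_eq] at hih
      simp only [List.map_cons, beq_iff_eq, hqk, if_false]
      by_cases hq2 : q.2 = m
      · rw [hq2, List.erase_cons_head]
        have hm2 : m ∈ l.map (·.2) := by simpa using List.mem_map_of_mem (f := (·.2)) h1
        exact ((List.Perm.cons m hih).trans (List.Perm.swap v m _)).trans
          (List.Perm.cons v (List.perm_cons_erase hm2).symm)
      · rw [List.erase_cons_tail (by simpa using hq2)]
        exact (List.Perm.cons q.2 hih).trans (List.Perm.swap v q.2 _)

-- proof-side helper: the linear insertion position into an ascending list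
def pvInsPos (free : List Int) (nt : Int) : Nat :=
  match free with
  | [] => 0
  | x :: rest => if x ≤ nt then pvInsPos rest nt + 1 else 0

-- pvInsPos is determined by 'prefix ≤ nt, next element > nt'
theorem pvInsPos_eq_of (free : List Int) (nt : Int) (p : Nat) (hp : p ≤ free.length)
    (h1 : ∀ (j : Nat) (hj : j < free.length), j < p → free[j] ≤ nt)
    (h2 : ∀ (h : p < free.length), nt < free[p]) : pvInsPos free nt = p := by
  induction free generalizing p with
  | nil =>
    have hp0 : p = 0 := by simpa using hp
    simp [pvInsPos, hp0]
  | cons x rest ih =>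
    simp only [pvInsPos]
    by_cases hx : x ≤ nt
    · cases p with
      | zero =>
        have := h2 (by simp)
        simp at this
        omega
      | succ q =>
        simp only [hx, if_pos, Nat.add_right_cancel_iff]
        refine ih q (by simpa using hp) ?_ ?_
        · intro j hj hjq
          have := h1 (j + 1) (by simpa using hj) (by omega)
          simpa using this
        · intro h
          have := h2 (by simpa using h)
          simpa using this
    · cases p with
      | zero => simp [hx]
      | succ q =>
        have := h1 0 (by simp) (by omega)
        simp at this
        omega

-- the binary search returns the same insertion position on a sorted list
theorem pvBisect_go (free : List Int) (nt : Int) (hs : free.Pairwise (· ≤ ·)) :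
    ∀ (n : Nat) (lo hi : Int), (hi - lo).toNat = n → 0 ≤ lo → lo ≤ hi →
      hi ≤ (free.length : Int) →
      (∀ (j : Nat) (hj : j < free.length), (j : Int) < lo → free[j] ≤ nt) →
      (∀ (j : Nat) (hj : j < free.length), hi ≤ (j : Int) → nt < free[j]) →
      pvBisect free nt lo hi = ((pvInsPos free nt : Nat) : Int) := by
  have hmono : ∀ (i j : Nat) (hi' : i < free.length) (hj : j < free.length),
      i ≤ j → free[i] ≤ free[j] := by
    intro i j hi' hj hij
    rcases Nat.lt_or_ge i j with h | h
    · exact List.pairwise_iff_getElem.mp hs i j hi' hj h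
    · have : i = j := by omega
      subst this; exact le_refl _
  intro n
  induction n using Nat.strong_induction_on with
  | _ n ih =>
    intro lo hi hn h0 hlh hhl Hlo Hhi
    rw [pvBisect]
    split_ifs with hlt hcmp
    · -- free[mid] ≤ nt: recurse on [mid+1, hi)
      have hmid := PySem.Int.floordiv_two_mid_bounds (lo := lo) (hi := hi) (by omega)
      have hmidlt : PySem.Int.floordiv (lo + hi) 2 < hi :=
        (PySem.Int.floordiv_lt_iff_lt_mul (by omega)).mpr (by omega)
      have hmlen : (PySem.Int.floordiv (lo + hi) 2).toNat < free.length := by omega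
      rw [PySem.List.pyGetD_eq_getElem free 0 (by omega) (by push_cast; omega)] at hcmp
      refine ih (hi - (PySem.Int.floordiv (lo + hi) 2 + 1)).toNat (by omega)
        (PySem.Int.floordiv (lo + hi) 2 + 1) hi rfl (by omega) (by omega) hhl ?_ Hhi
      intro j hj hjlt
      calc free[j] ≤ free[(PySem.Int.floordiv (lo + hi) 2).toNat] :=
            hmono j _ hj hmlen (by omega)
        _ ≤ nt := hcmp
    · -- nt < free[mid]: recurse on [lo, mid)
      have hmid := PySem.Int.floordiv_two_mid_bounds (lo := lo) (hi := hi) (by omega)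
      have hmidlt : PySem.Int.floordiv (lo + hi) 2 < hi :=
        (PySem.Int.floordiv_lt_iff_lt_mul (by omega)).mpr (by omega)
      have hmlen : (PySem.Int.floordiv (lo + hi) 2).toNat < free.length := by omega
      rw [PySem.List.pyGetD_eq_getElem free 0 (by omega) (by push_cast; omega)] at hcmp
      refine ih (PySem.Int.floordiv (lo + hi) 2 - lo).toNat (by omega) lo
        (PySem.Int.floordiv (lo + hi) 2) rfl h0 (by omega) (by omega) Hlo ?_
      intro j hj hjge
      calc nt < free[(PySem.Int.floordiv (lo + hi) 2).toNat] := by omega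
        _ ≤ free[j] := hmono _ j hmlen hj (by omega)
    · -- lo = hi: the linear position satisfies the same bracketing
      have hpos : pvInsPos free nt = lo.toNat := by
        refine pvInsPos_eq_of free nt lo.toNat (by omega) ?_ ?_
        · intro j hj hjlt
          exact Hlo j hj (by omega)
        · intro h
          exact Hhi lo.toNat h (by omega)
      rw [hpos]
      omega

theorem pvBisect_eq (free : List Int) (nt : Int) (hs : free.Pairwise (· ≤ ·)) :
    pvBisect free nt 0 (PySem.List.len free) = ((pvInsPos free nt : Nat) : Int) := by
  rw [PySem.List.len_eq]
  exact pvBisect_go free nt hs ((free.length : Int) - 0).toNat 0 free.length rfl (by omega)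
    (by omega) (by omega) (by intro j hj h; omega) (by intro j hj h; omega)

-- B's ordered insertion: position bound, permutation, and sortedness
theorem pvInsPos_le (free : List Int) (nt : Int) : pvInsPos free nt ≤ free.length := by
  induction free with
  | nil => simp [pvInsPos]
  | cons x rest ih => simp only [pvInsPos, List.length_cons]; split_ifs <;> omega

theorem pvIns_eq (free : List Int) (nt : Int) :
    PySem.List.insert free ((pvInsPos free nt : Nat) : Int) nt =
      free.take (pvInsPos free nt) ++ nt :: free.drop (pvInsPos free nt) :=
  PySem.List.insert_natCast free _ nt (pvInsPos_le free nt)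

theorem pvIns_perm (free : List Int) (nt : Int) :
    (PySem.List.insert free ((pvInsPos free nt : Nat) : Int) nt).Perm (nt :: free) := by
  rw [pvIns_eq]
  calc (free.take (pvInsPos free nt) ++ nt :: free.drop (pvInsPos free nt)).Perm
        (nt :: (free.take (pvInsPos free nt) ++ free.drop (pvInsPos free nt))) := List.perm_middle
    _ = nt :: free := by rw [List.take_append_drop]

theorem pvInsPos_take_le (free : List Int) (nt : Int) :
    ∀ a ∈ free.take (pvInsPos free nt), a ≤ nt := by
  induction free with
  | nil => simp
  | cons x rest ih =>
    simp only [pvInsPos]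
    split_ifs with hx
    · intro a ha
      rcases List.mem_cons.mp (by simpa using ha) with h | h
      · omega
      · exact ih a h
    · simp

theorem pvInsPos_drop_ge (free : List Int) (nt : Int) (h : free.Pairwise (· ≤ ·)) :
    ∀ b ∈ free.drop (pvInsPos free nt), nt ≤ b := by
  induction free with
  | nil => simp
  | cons x rest ih =>
    simp only [pvInsPos]
    rw [List.pairwise_cons] at h
    split_ifs with hx
    · exact fun b hb => ih h.2 b (by simpa using hb)
    · intro b hb
      rcases List.mem_cons.mp (by simpa using hb) with h1 | h1
      · omega
      · have := h.1 b h1; omega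

theorem pvIns_sorted (free : List Int) (nt : Int) (h : free.Pairwise (· ≤ ·)) :
    (PySem.List.insert free ((pvInsPos free nt : Nat) : Int) nt).Pairwise (· ≤ ·) := by
  rw [pvIns_eq]
  rw [List.pairwise_append]
  refine ⟨h.sublist (List.take_sublist _ _), ?_, ?_⟩
  · rw [List.pairwise_cons]
    exact ⟨pvInsPos_drop_ge free nt h, h.sublist (List.drop_sublist _ _)⟩
  · intro a ha b hb
    have ha' := pvInsPos_take_le free nt a ha
    rcases List.mem_cons.mp hb with h1 | h1
    · omega
    · have := pvInsPos_drop_ge free nt h b h1; omega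

-- main invariant: A's dict state and B's sorted free list hold the same multiset of times
theorem pvMain (tasks : List (String × Int × Int)) (N : Int) (workers : PySem.Dict Int Int)
    (free : List Int) (hnd : workers.keys.Nodup) (hperm : free.Perm workers.values)
    (hsorted : free.Pairwise (· ≤ ·)) (hne : free ≠ [] ∨ tasks = []) :
    pvALoop N workers tasks = pvBLoop free tasks := by
  induction tasks generalizing workers free with
  | nil => rfl
  | cons task rest ih =>
    obtain ⟨name, dur, dmax⟩ := task
    have hfree : free ≠ [] := by
      rcases hne with h | h
      · exact h
      · exact absurd h (by simp)
    obtain ⟨t, free', rfl⟩ : ∃ t free', free = t :: free' := by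
      cases free with
      | nil => exact absurd rfl hfree
      | cons a b => exact ⟨a, b, rfl⟩
    have hitems : workers.items ≠ [] := by
      intro h0
      have : workers.values = [] := by simp [PySem.Dict.values, h0]
      have := hperm.length_eq
      simp [‹workers.values = []›] at this
    obtain ⟨m, k, heq, hkm, hall⟩ := pvAStep_foldl_min workers.items hitems N
    have hndi : (workers.items.map (·.1)).Nodup := hnd
    have hgetD : workers.getD k 0 = m := PySem.Dict.getD_of_mem_items workers hkm hnd 0
    -- m = t: both are the minimum of the common multiset
    have hmt : m = t := by
      have hmv : m ∈ workers.values := by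
        simpa [PySem.Dict.values] using List.mem_map_of_mem (f := (·.2)) hkm
      have hmf : m ∈ t :: free' := hperm.symm.subset hmv
      have htm : t ≤ m := by
        rcases List.mem_cons.mp hmf with h1 | h1
        · omega
        · exact (List.pairwise_cons.mp hsorted).1 m h1
      have hmt' : m ≤ t := by
        have htv : t ∈ workers.values := hperm.subset (List.mem_cons_self ..)
        obtain ⟨p, hp, hpt⟩ := List.mem_map.mp htv
        have := hall p hp
        omega
      omega
    -- unfold one step of both loops
    show (let mv := workers.items.foldl pvAStep (none, N + 1)
          let worker_start_time := workers.getD mv.2 0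
          if worker_start_time > dmax then false
          else pvALoop N (workers.insert mv.2 (worker_start_time + dur)) rest) =
         (if t > dmax then false
          else pvBLoop (PySem.List.insert free' (pvBisect free' (t + dur) 0 (PySem.List.len free')) (t + dur)) rest)
    rw [pvBisect_eq free' (t + dur) (List.pairwise_cons.mp hsorted).2]
    simp only [heq, hgetD, hmt]
    by_cases hcmp : t > dmax
    · simp [hcmp]
    · simp only [hcmp, if_false]
      apply ih
      · exact PySem.Dict.nodup_keys_insert workers k (t + dur) hnd
      · -- permutation of the new value multisets
        have hcont : workers.contains k = true := by
          rw [PySem.Dict.contains_iff_mem_keys workers k]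
          exact PySem.Dict.mem_keys_of_mem_items workers hkm
        have hval : (workers.insert k (t + dur)).values =
            (workers.items.map (fun p => if p.1 == k then (k, t + dur) else p)).map (·.2) := by
          simp [PySem.Dict.values, PySem.Dict.items_insert_of_contains workers (t + dur) hcont]
        have hrepl := pvValues_replace workers.items k t (t + dur) hndi (hmt ▸ hkm)
        have hfe : free'.Perm (workers.values.erase t) := by
          have h1 : ((t :: free').erase t).Perm (workers.values.erase t) := hperm.erase t
          simpa using h1
        have hrepl' : ((workers.insert k (t + dur)).values).Perm
            ((t + dur) :: (workers.values).erase t) := by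
          rw [hval]; exact hrepl
        exact (pvIns_perm free' (t + dur)).trans ((hfe.cons (t + dur)).trans hrepl'.symm)
      · exact pvIns_sorted free' (t + dur) (List.pairwise_cons.mp hsorted).2
      · left
        intro h0
        have := (pvIns_perm free' (t + dur)).length_eq
        simp [h0] at this

theorem check_tasks_spec : Claim_equal_check_tasks := by
  intro tasks N _ hpre
  show check_tasks tasks N = check_tasks_alt tasks N
  unfold check_tasks check_tasks_alt
  have hvals : ((PySem.List.pyRange 0 N 1).foldl
      (fun d i => d.insert i (0 : Int)) PySem.Dict.empty).values = List.replicate N.toNat 0 := by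
    have hitems := PySem.Dict.items_foldl_insert_fresh (PySem.List.pyRange 0 N 1)
      (fun i => i) (fun _ => (0 : Int)) PySem.Dict.empty
      (fun a _ => PySem.Dict.contains_empty a)
      (by simpa using PySem.List.nodup_pyRange_one 0 N)
    simp only [PySem.Dict.values, hitems]
    simp [PySem.Dict.empty, Function.comp_def, List.map_const', PySem.List.length_pyRange_one]
  apply pvMain
  · exact PySem.Dict.nodup_keys_foldl_insert _ _ _ PySem.Dict.nodup_keys_empty
  · rw [hvals]
  · exact List.pairwise_replicate.mpr (Or.inr (le_refl 0))
  · rcases hpre with h | h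
    · right
      subst h
      simp [PySem.List.sorted]
    · left
      have : 1 ≤ N.toNat := by omega
      simp only [ne_eq, List.replicate_eq_nil_iff]
      omega
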